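-- pv_equiv track=rewrite | github.com/Harshitha935/Loopholes | app.py | _is_edit_request
-- ===== SOURCE A (Python) =====
-- def _is_edit_request(prompt: str) -> bool:
--     low = (prompt or "").lower()
--     return any(
--         k in low
--         for k in [
--             "improve",
--             "edit",
--             "update",
--             "rewrite",
--             "expand",
--             "add more",
--             "add section",
--             "fix",
--             "change",
--             "revise",
--             "make it better",
--             "elaborate",
--         ]
--     )
-- ===== SOURCE B (Python) =====
-- _KEYWORDS = [
--     "improve", "edit", "update", "rewrite", "expand", "add more",
--     "add section", "fix", "change", "revise", "make it better", "elaborate",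
-- ]
--
-- def _is_edit_request(prompt: str) -> bool:
--     low = (prompt or "").lower()
--     for i in range(len(low)):
--         for k in _KEYWORDS:
--             if low.startswith(k, i):
--                 return True
--     return False
-- ===== Notes on version B (the rewrite author's own statement) =====
-- stated objective: alternative
-- what changed: A runs twelve independent per-keyword substring scans over the lowered prompt; B makes a single left-to-right pass over the lowered prompt, testing at each position whether any keyword starts there.
import Mathlib
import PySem

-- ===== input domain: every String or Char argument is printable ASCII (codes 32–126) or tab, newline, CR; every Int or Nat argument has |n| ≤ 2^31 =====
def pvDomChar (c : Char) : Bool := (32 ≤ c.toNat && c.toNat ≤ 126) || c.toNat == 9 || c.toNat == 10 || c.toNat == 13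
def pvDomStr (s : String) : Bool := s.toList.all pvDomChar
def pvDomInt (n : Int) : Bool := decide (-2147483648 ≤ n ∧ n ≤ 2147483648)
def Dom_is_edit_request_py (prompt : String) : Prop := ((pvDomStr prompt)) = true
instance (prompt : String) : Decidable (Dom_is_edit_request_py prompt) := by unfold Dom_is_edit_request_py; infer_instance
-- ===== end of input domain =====

-- ===== PORT A =====
-- B replaces A's twelve independent substring scans by one left-to-right pass
-- checking every keyword as a prefix at each position (objective: alternative).
-- 'prompt or ""' is the identity on str (falsy str is "" itself), so the port lowers prompt directly.
def kwA : List String :=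
  ["improve", "edit", "update", "rewrite", "expand", "add more",
   "add section", "fix", "change", "revise", "make it better", "elaborate"]

def is_edit_request_py (prompt : String) : Bool :=
  let low := PySem.Str.lower prompt
  kwA.any (fun k => PySem.Str.isIn k low)

-- ===== PORT B =====
def kwB : List (List Char) :=
  ["improve", "edit", "update", "rewrite", "expand", "add more",
   "add section", "fix", "change", "revise", "make it better", "elaborate"].map String.toList

-- one pass over positions: at each suffix, does some keyword start here? (= low.startswith(k, i))
def scanKw (ks : List (List Char)) : List Char → Bool
  | [] => false
  | c :: rest => ks.any (fun k => k.isPrefixOf (c :: rest)) || scanKw ks rest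

def is_edit_request_py_alt (prompt : String) : Bool :=
  let low := PySem.Str.lower prompt
  scanKw kwB low.toList
-- ===== PRECONDITION & SPEC =====
def Spec_is_edit_request_py (prompt : String) (out : Bool) : Prop := out = is_edit_request_py_alt prompt
instance (prompt : String) (out : Bool) : Decidable (Spec_is_edit_request_py prompt out) := by unfold Spec_is_edit_request_py; infer_instance

-- ===== CLAIM (what is proved, stated in full; the proofs are below) =====
def Claim_equal_is_edit_request_py : Prop := ∀ (prompt : String), Dom_is_edit_request_py prompt → Spec_is_edit_request_py prompt (is_edit_request_py prompt)

-- ===== LEMMAS AND PROOFS =====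

lemma scanKw_eq_any_infix (ks : List (List Char)) (h : ∀ k ∈ ks, k ≠ []) :
    ∀ s : List Char, scanKw ks s = ks.any (fun k => decide (k <:+: s)) := by
  intro s
  induction s with
  | nil =>
    simp [scanKw, List.any_eq_false]
    intro k hk hinf
    exact h k hk hinf
  | cons c rest ih =>
    simp only [scanKw, ih]
    rw [Bool.eq_iff_iff]
    simp only [Bool.or_eq_true, List.any_eq_true, decide_eq_true_eq,
      List.isPrefixOf_iff_prefix, List.infix_cons_iff]
    constructor
    · rintro (⟨k, hk, hp⟩ | ⟨k, hk, hi⟩)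
      · exact ⟨k, hk, Or.inl hp⟩
      · exact ⟨k, hk, Or.inr hi⟩
    · rintro ⟨k, hk, hp | hi⟩
      · exact Or.inl ⟨k, hk, hp⟩
      · exact Or.inr ⟨k, hk, hi⟩

lemma isIn_eq_decide (sub s : String) :
    PySem.Str.isIn sub s = decide (sub.toList <:+: s.toList) := by
  simp only [PySem.Str.isIn_eq]
  by_cases hc : sub.toList <:+: s.toList
  · simp only [hc, decide_true]
    exact (PySem.Chars.isIn_iff_infix _ _).mpr hc
  · simp only [hc, decide_false]
    exact Bool.eq_false_iff.mpr (fun ht => hc ((PySem.Chars.isIn_iff_infix _ _).mp ht))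

-- ===== VERDICT (by name: the statement is the Claim_ definition above) =====
theorem is_edit_request_py_spec : Claim_equal_is_edit_request_py := by
  intro prompt _
  unfold Spec_is_edit_request_py is_edit_request_py is_edit_request_py_alt
  rw [scanKw_eq_any_infix kwB (by decide)]
  unfold kwA kwB
  rw [List.any_map]
  refine List.any_congr rfl (fun k => ?_)
  exact isIn_eq_decide k (PySem.Str.lower prompt)
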